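-- pv_equiv track=rewrite | github.com/YasoobAli27/CPS109-209-Projects-Labs | lab4_YASOOB_ALI_NEWEST_VERSION.py | biggestBuried
-- ===== SOURCE A (Python) =====
-- def biggestBuried(x) :
--     #sets the base value of num to nothing and the current largestNumber to 0
--     num = ''
--     largestNumber = 0
--     #creates a for loop that cycles through all values of the string inputted
--     for i in x :
--         #ascii values from 0-9 (48 is 0, 57 is 9)
--         #if i is within this range of values, that means it is a digit and will then check the next number to see if its also a digit in order to combine them
--         if i >= chr(48) and i <= chr(57) :
--             num += i
--         #otherwise, if it is a digit and the value that it is currently on is largest than the largestNumber, then it will make largestNumber that value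
--         #and reset num to nothing, as it will move on to the next part of the string
--         elif num.isdigit() == True and int(num) > largestNumber :
--             largestNumber = int(num)
--             num = ''
--         #otherwise, it is not a digit and will be ignored
--         else :
--             num = ''
--     #after the for loop is complete, it will repeat the following if statement to ensure that the largestNumber is still the highest value buried in the string
--     if num.isdigit() == True and int(num) > largestNumber :
--         largestNumber = int(num)
--     #will return the largestNumber value
--     return largestNumber
-- ===== SOURCE B (Python) =====
-- def biggestBuried(x):
--     # Replace every non-digit by a space, split into maximal digit runs, reduce with max.
--     words = ''.join(c if '0' <= c <= '9' else ' ' for c in x).split()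
--     return max(map(int, words), default=0)
-- ===== Notes on version B (the rewrite author's own statement) =====
-- stated objective: idiomatic
-- what changed: Replaces the stateful character loop tracking a partial digit run and a running maximum with a declarative pipeline: map non-digits to spaces, split() into maximal digit runs, then max(map(int, ...), default=0).
import Mathlib
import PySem

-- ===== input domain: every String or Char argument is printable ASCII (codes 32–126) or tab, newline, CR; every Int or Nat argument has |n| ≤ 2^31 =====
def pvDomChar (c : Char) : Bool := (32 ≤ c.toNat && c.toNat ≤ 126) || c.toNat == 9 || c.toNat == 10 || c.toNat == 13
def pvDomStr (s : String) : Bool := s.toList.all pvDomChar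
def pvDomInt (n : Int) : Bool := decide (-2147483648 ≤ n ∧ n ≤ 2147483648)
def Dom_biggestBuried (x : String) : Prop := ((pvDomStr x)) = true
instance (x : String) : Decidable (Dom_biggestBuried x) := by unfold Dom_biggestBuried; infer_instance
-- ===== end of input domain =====

-- B replaces A's stateful char loop (partial digit run + running max) with: blank out non-digits,
-- split into maximal digit runs, max(map(int, runs), default=0). Same value on every string; objective: idiomatic.


-- ===== PORT A =====
-- i >= chr(48) and i <= chr(57)  (chr(48) = '0', chr(57) = '9'; Python compares 1-char strings by code point)
def pvIsDig (c : Char) : Bool := decide ('0' ≤ c) && decide (c ≤ '9')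

-- int(num); in both programs every call is on a non-empty all-digit string, where ofChars? is some
def pvVal (num : List Char) : Int := (PySem.Int.ofChars? num).getD 0

-- one iteration of A's for-loop over (num, largestNumber)
def pvStepA (st : List Char × Int) (c : Char) : List Char × Int :=
  if pvIsDig c then (st.1 ++ [c], st.2)
  else if PySem.Chars.strIsdigit st.1 && decide (pvVal st.1 > st.2) then ([], pvVal st.1)
  else ([], st.2)

def biggestBuried (x : String) : Int :=
  let st := x.toList.foldl pvStepA ([], 0)
  if PySem.Chars.strIsdigit st.1 && decide (pvVal st.1 > st.2) then pvVal st.1 else st.2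

-- ===== PORT B =====
-- ''.join(c if '0' <= c <= '9' else ' ' for c in x).split()  then  max(map(int, words), default=0)
def biggestBuried_alt (x : String) : Int :=
  let words := PySem.Chars.split₀ (x.toList.map (fun c => if pvIsDig c then c else ' '))
  PySem.List.maxD (words.map pvVal) (fun v => v) 0

-- ===== PRECONDITION & SPEC =====
def Spec_biggestBuried (x : String) (out : Int) : Prop := out = biggestBuried_alt x
instance (x : String) (out : Int) : Decidable (Spec_biggestBuried x out) := by unfold Spec_biggestBuried; infer_instance

-- ===== CLAIM (what is proved, stated in full; the proofs are below) =====
def Claim_equal_biggestBuried : Prop := ∀ (x : String), Dom_biggestBuried x → Spec_biggestBuried x (biggestBuried x)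

-- ===== LEMMAS AND PROOFS =====

-- words produced from x by B (split₀.go with pending digit run `num`, no words emitted yet)
def pvW (cs num : List Char) : List (List Char) :=
  PySem.Chars.split₀.go (cs.map (fun c => if pvIsDig c then c else ' ')) num.reverse []

lemma pvIsDig_toNat {c : Char} (h : pvIsDig c = true) : 48 ≤ c.toNat ∧ c.toNat ≤ 57 := by
  simp only [pvIsDig, Bool.and_eq_true, decide_eq_true_eq, Char.le_def, UInt32.le_iff_toNat_le] at h
  exact h

lemma pvIsDig_not_isspace {c : Char} (h : pvIsDig c = true) : PySem.Chars.isspace c = false := by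
  obtain ⟨h1, h2⟩ := pvIsDig_toNat h
  simp only [PySem.Chars.isspace, Bool.or_eq_false_iff, Bool.and_eq_false_iff, decide_eq_false_iff_not]
  omega

lemma pvIsDig_not_intspace {c : Char} (h : pvIsDig c = true) : PySem.Int.isIntSpace c = false := by
  obtain ⟨h1, h2⟩ := pvIsDig_toNat h
  have hne : ∀ (d : Char) (n : Nat), d.toNat = n → c.toNat ≠ n → c ≠ d := by
    rintro d n rfl hd rfl; exact hd rfl
  simp only [PySem.Int.isIntSpace, Bool.or_eq_false_iff, decide_eq_false_iff_not]
  refine ⟨⟨⟨⟨⟨hne _ 32 rfl ?_, hne _ 9 rfl ?_⟩, hne _ 10 rfl ?_⟩, hne _ 13 rfl ?_⟩, hne _ 11 rfl ?_⟩, hne _ 12 rfl ?_⟩ <;> omega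

lemma dropWhile_self {l : List Char} (h : ∀ a ∈ l, PySem.Int.isIntSpace a = false) :
    l.dropWhile PySem.Int.isIntSpace = l := by
  cases l with
  | nil => rfl
  | cons c t => rw [List.dropWhile_cons_of_neg]; simp [h c (by simp)]

lemma pv_aux (o : Option Nat) :
    0 ≤ (Option.map (fun n : Int => n) (do let a ← o; pure ((a : Nat) : Int))).getD 0 := by
  cases o <;> simp

lemma pv_val_nonneg {ds : List Char} (h : ds.all pvIsDig = true) : 0 ≤ pvVal ds := by
  simp only [List.all_eq_true] at h
  have hsp : ∀ a ∈ ds, PySem.Int.isIntSpace a = false := fun a ha => pvIsDig_not_intspace (h a ha)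
  have hsp' : ∀ a ∈ ds.reverse, PySem.Int.isIntSpace a = false := by simpa using hsp
  unfold pvVal PySem.Int.ofChars?
  rw [dropWhile_self hsp, dropWhile_self hsp', List.reverse_reverse]
  cases ds with
  | nil => decide
  | cons c t =>
    have hc := pvIsDig_toNat (h c (by simp))
    have hm : c ≠ '-' := by intro he; subst he; revert hc; decide
    have hp : c ≠ '+' := by intro he; subst he; revert hc; decide
    dsimp only
    split
    · next heq => rw [List.cons.injEq] at heq; exact absurd heq.1 hm
    · next heq => rw [List.cons.injEq] at heq; exact absurd heq.1 hp
    · exact pv_aux _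

lemma pv_strIsdigit {num : List Char} (h : num.all pvIsDig = true) :
    PySem.Chars.strIsdigit num = !num.isEmpty := by
  simp only [PySem.Chars.strIsdigit]
  have h2 : num.all PySem.Chars.isdigit = true := h
  simp [h2]

lemma pv_go_acc (cs : List Char) : ∀ (cur : List Char) (acc : List (List Char)),
    PySem.Chars.split₀.go cs cur acc = acc.reverse ++ PySem.Chars.split₀.go cs cur [] := by
  induction cs with
  | nil =>
    intro cur acc
    simp only [PySem.Chars.split₀.go]
    by_cases hc : cur.isEmpty <;> simp [hc]
  | cons c rest ih =>
    intro cur acc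
    by_cases hs : PySem.Chars.isspace c = true
    · by_cases hc : cur.isEmpty = true
      · simp only [PySem.Chars.split₀.go, hs, hc, if_true]
        exact ih [] acc
      · have hc' := eq_false_of_ne_true hc
        simp only [PySem.Chars.split₀.go, hs, hc', Bool.false_eq_true, if_true, if_false]
        rw [ih [] (cur.reverse :: acc), ih [] [cur.reverse]]
        simp
    · have hs' := eq_false_of_ne_true hs
      simp only [PySem.Chars.split₀.go, hs', Bool.false_eq_true, if_false]
      exact ih (c :: cur) acc

lemma pvW_nil (num : List Char) : pvW [] num = if num.isEmpty then [] else [num] := by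
  simp only [pvW, List.map_nil, PySem.Chars.split₀.go, List.isEmpty_reverse, List.reverse_reverse]
  by_cases hc : num.isEmpty = true <;> simp [hc]

lemma pvW_cons_dig {c : Char} (cs num : List Char) (h : pvIsDig c = true) :
    pvW (c :: cs) num = pvW cs (num ++ [c]) := by
  simp only [pvW, List.map_cons, h, if_true, PySem.Chars.split₀.go,
    pvIsDig_not_isspace h, Bool.false_eq_true, if_false, List.reverse_append, List.reverse_cons,
    List.reverse_nil, List.nil_append, List.singleton_append]

lemma pvW_cons_nondig_nil {c : Char} (cs : List Char) (h : pvIsDig c = false) :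
    pvW (c :: cs) [] = pvW cs [] := by
  simp only [pvW, List.map_cons, h, Bool.false_eq_true, if_false, PySem.Chars.split₀.go]
  norm_num [show PySem.Chars.isspace ' ' = true from rfl]

lemma pvW_cons_nondig {c : Char} (cs num : List Char) (h : pvIsDig c = false) (hn : num ≠ []) :
    pvW (c :: cs) num = num :: pvW cs [] := by
  simp only [pvW, List.map_cons, h, Bool.false_eq_true, if_false, PySem.Chars.split₀.go]
  rw [if_pos (show PySem.Chars.isspace ' ' = true from rfl),
      if_neg (by simp [hn]), List.reverse_reverse]
  rw [pv_go_acc _ [] [num]]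
  simp

lemma pv_words_digit (cs : List Char) : ∀ num, num.all pvIsDig = true →
    ∀ w ∈ pvW cs num, w ≠ [] ∧ w.all pvIsDig = true := by
  induction cs with
  | nil =>
    intro num h w hw
    rw [pvW_nil] at hw
    by_cases hn : num.isEmpty = true
    · simp [hn] at hw
    · have hn' := eq_false_of_ne_true hn
      simp only [hn', Bool.false_eq_true, if_false, List.mem_singleton] at hw
      subst hw
      exact ⟨by simpa using hn, h⟩
  | cons c rest ih =>
    intro num h w hw
    by_cases hd : pvIsDig c = true
    · rw [pvW_cons_dig _ _ hd] at hw
      exact ih (num ++ [c]) (by simp_all) w hw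
    · have hd' := eq_false_of_ne_true hd
      by_cases hn : num = []
      · subst hn
        rw [pvW_cons_nondig_nil _ hd'] at hw
        exact ih [] rfl w hw
      · rw [pvW_cons_nondig _ _ hd' hn] at hw
        rcases List.mem_cons.mp hw with rfl | hw2
        · exact ⟨hn, h⟩
        · exact ih [] rfl w hw2

lemma pv_main (cs : List Char) : ∀ (num : List Char) (L : Int), num.all pvIsDig = true →
    (let st := cs.foldl pvStepA (num, L)
     if PySem.Chars.strIsdigit st.1 && decide (pvVal st.1 > st.2) then pvVal st.1 else st.2)
    = (pvW cs num).foldl (fun m w => max m (pvVal w)) L := by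
  induction cs with
  | nil =>
    intro num L h
    simp only [List.foldl_nil, pvW_nil]
    by_cases hn : num.isEmpty = true
    · have : num = [] := by simpa [List.isEmpty_iff] using hn
      subst this
      simp [PySem.Chars.strIsdigit]
    · have hn' := eq_false_of_ne_true hn
      rw [pv_strIsdigit h, hn']
      simp only [Bool.not_false, Bool.true_and, Bool.false_eq_true, if_false,
        List.foldl_cons, List.foldl_nil, decide_eq_true_eq]
      split <;> omega
  | cons c rest ih =>
    intro num L h
    by_cases hd : pvIsDig c = true
    · rw [pvW_cons_dig _ _ hd]
      simp only [List.foldl_cons, pvStepA, hd, if_true]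
      exact ih (num ++ [c]) L (by simp_all)
    · have hd' := eq_false_of_ne_true hd
      by_cases hn : num = []
      · subst hn
        rw [pvW_cons_nondig_nil _ hd']
        simp only [List.foldl_cons, pvStepA, hd', Bool.false_eq_true, if_false,
          PySem.Chars.strIsdigit, List.isEmpty_nil, Bool.not_true, Bool.false_and, Bool.false_eq_true]
        exact ih [] L rfl
      · rw [pvW_cons_nondig _ _ hd' hn]
        have hstate : (if (PySem.Chars.strIsdigit num && decide (pvVal num > L)) = true
              then (([] : List Char), pvVal num) else (([] : List Char), L))
            = (([] : List Char), max L (pvVal num)) := by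
          rw [pv_strIsdigit h]
          have he : num.isEmpty = false := by simpa [List.isEmpty_iff] using hn
          simp only [he, Bool.not_false, Bool.true_and, decide_eq_true_eq]
          split <;> simp <;> omega
        simp only [List.foldl_cons, pvStepA, hd', Bool.false_eq_true, if_false]
        rw [hstate]
        exact ih [] (max L (pvVal num)) rfl

lemma pv_maxD (ws : List (List Char)) (h : ∀ w ∈ ws, 0 ≤ pvVal w) :
    PySem.List.maxD (ws.map pvVal) (fun v => v) 0 = ws.foldl (fun m w => max m (pvVal w)) 0 := by
  cases ws with
  | nil => rfl
  | cons w t =>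
    simp only [List.map_cons, PySem.List.maxD, PySem.List.max?_id_cons, Option.getD_some,
      List.foldl_cons]
    rw [max_eq_right (h w (by simp)), List.foldl_map]

-- ===== VERDICT (by name: the statement is the Claim_ definition above) =====
theorem biggestBuried_spec : Claim_equal_biggestBuried := by
  intro x _
  show biggestBuried x = biggestBuried_alt x
  have hmain := pv_main x.toList [] 0 rfl
  have hw := pv_words_digit x.toList [] rfl
  have he : PySem.Chars.split₀ (List.map (fun c => if pvIsDig c = true then c else ' ') x.toList)
      = pvW x.toList [] := rfl
  simp only [biggestBuried, biggestBuried_alt]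
  rw [hmain, he, pv_maxD _ (fun w hw' => pv_val_nonneg (hw w hw').2)]
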